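-- pv_equiv track=rewrite | github.com/sukatu/juridence | backend/services/enhanced_gazette_extractor.py | verify_item_sequence
-- ===== SOURCE A (Python) =====
-- from typing import Dict, List, Optional, Tuple, Set
--
-- def verify_item_sequence(item_numbers: List[str], gazette_number: str) -> List[Tuple[str, str]]:
--     """Verify Item Number sequence continuity and return missing ranges"""
--     missing_ranges = []
--
--     if not item_numbers or len(item_numbers) < 2:
--         return missing_ranges
--
--     # Convert to integers and sort
--     try:
--         nums = sorted([int(n) for n in item_numbers if n and n.isdigit()])
--     except:
--         return missing_ranges
--
--     # Check for gaps
--     for i in range(len(nums) - 1):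
--         if nums[i+1] - nums[i] > 1:
--             start = nums[i] + 1
--             end = nums[i+1] - 1
--             missing_ranges.append((str(start), str(end)))
--
--     return missing_ranges
-- ===== SOURCE B (Python) =====
-- from typing import List, Tuple
--
-- def verify_item_sequence(item_numbers: List[str], gazette_number: str) -> List[Tuple[str, str]]:
--     """Verify Item Number sequence continuity and return missing ranges.
--
--     Successor-chasing over a set of the parsed numbers: no sorting pass;
--     repeatedly jump from each present number to the least larger one,
--     emitting the gap between them when it is non-empty.
--     """
--     if not item_numbers or len(item_numbers) < 2:
--         return []
--     try:
--         nums = {int(n) for n in item_numbers if n and n.isdigit()}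
--     except:
--         return []
--     if not nums:
--         return []
--     lo, hi = min(nums), max(nums)
--     missing_ranges = []
--     cur = lo
--     while cur < hi:
--         nxt = min(y for y in nums if y > cur)
--         if nxt > cur + 1:
--             missing_ranges.append((str(cur + 1), str(nxt - 1)))
--         cur = nxt
--     return missing_ranges
-- ===== Notes on version B (the rewrite author's own statement) =====
-- stated objective: alternative
-- what changed: Replaced A's sort-then-adjacent-pairs gap scan by successor chasing over a set of the parsed numbers: starting at min, repeatedly jump to the least element greater than the current one, emitting a missing range whenever the jump skips integers.
import Mathlib
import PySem

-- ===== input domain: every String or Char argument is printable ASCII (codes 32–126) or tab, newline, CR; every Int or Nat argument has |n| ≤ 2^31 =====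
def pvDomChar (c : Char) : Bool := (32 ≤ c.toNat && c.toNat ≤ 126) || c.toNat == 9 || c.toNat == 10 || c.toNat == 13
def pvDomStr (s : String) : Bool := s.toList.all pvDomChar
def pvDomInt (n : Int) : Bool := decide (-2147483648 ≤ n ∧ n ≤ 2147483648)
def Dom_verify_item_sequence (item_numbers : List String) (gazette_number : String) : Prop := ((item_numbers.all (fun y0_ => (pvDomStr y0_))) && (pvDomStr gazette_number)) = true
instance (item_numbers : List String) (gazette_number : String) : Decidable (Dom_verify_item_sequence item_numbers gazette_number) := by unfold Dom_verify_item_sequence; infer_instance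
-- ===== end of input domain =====

-- B replaces A's sort-then-adjacent-pairs scan by successor chasing over a set of
-- the parsed numbers (jump from each present number to the least larger one);
-- objective: alternative algorithm, same observable behaviour.

-- ===== PORT A =====
-- A's gap loop `for i in range(len(nums)-1): if nums[i+1]-nums[i] > 1: append(...)`
-- as the obvious structural recursion over consecutive pairs of the same sorted list.
def pvGapsA : List Int → List (String × String)
  | a :: b :: t =>
    (if b - a > 1 then [(PySem.Int.toStr (a + 1), PySem.Int.toStr (b - 1))] else [])
      ++ pvGapsA (b :: t)
  | _ => []

def verify_item_sequence (item_numbers : List String) (gazette_number : String) : List (String × String) :=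
  if item_numbers = [] ∨ item_numbers.length < 2 then []
  else
    -- try: nums = sorted([int(n) for n in item_numbers if n and n.isdigit()]) except: return []
    let strs := item_numbers.filter (fun n => decide (n ≠ "") && PySem.Str.strIsdigit n)
    if strs.all (fun n => (PySem.Int.ofStr? n).isSome) then
      pvGapsA (PySem.List.sorted (strs.filterMap PySem.Int.ofStr?) (fun x => x) false)
    else []

-- ===== PORT B =====
-- B's while loop: chase the least element of the set greater than cur; fuel = |set|
-- (an upper bound on the number of iterations, proved sufficient below).
def pvChase (nums : List Int) (hi : Int) (cur : Int) : Nat → List (String × String)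
  | 0 => []
  | Nat.succ f =>
    if cur < hi then
      match PySem.List.min? (nums.filter (fun y => decide (cur < y))) (fun y => y) with
      | none => []
      | some nxt =>
        (if nxt > cur + 1 then [(PySem.Int.toStr (cur + 1), PySem.Int.toStr (nxt - 1))] else [])
          ++ pvChase nums hi nxt f
    else []

def verify_item_sequence_alt (item_numbers : List String) (gazette_number : String) : List (String × String) :=
  if item_numbers = [] ∨ item_numbers.length < 2 then []
  else
    let strs := item_numbers.filter (fun n => decide (n ≠ "") && PySem.Str.strIsdigit n)
    if strs.all (fun n => (PySem.Int.ofStr? n).isSome) then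
      let nums : PySem.Set Int := PySem.Set.ofList (strs.filterMap PySem.Int.ofStr?)
      match PySem.List.min? nums (fun x => x), PySem.List.max? nums (fun x => x) with
      | some lo, some hi => pvChase nums hi lo nums.length
      | _, _ => []
    else []

-- ===== PRECONDITION & SPEC =====
def Spec_verify_item_sequence (item_numbers : List String) (gazette_number : String) (out : List (String × String)) : Prop := out = verify_item_sequence_alt item_numbers gazette_number
instance (item_numbers : List String) (gazette_number : String) (out : List (String × String)) : Decidable (Spec_verify_item_sequence item_numbers gazette_number out) := by unfold Spec_verify_item_sequence; infer_instance

-- ===== CLAIM (what is proved, stated in full; the proofs are below) =====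
def Claim_equal_verify_item_sequence : Prop := ∀ (item_numbers : List String) (gazette_number : String), Dom_verify_item_sequence item_numbers gazette_number → Spec_verify_item_sequence item_numbers gazette_number (verify_item_sequence item_numbers gazette_number)

-- ===== LEMMAS AND PROOFS =====

-- pvGapsA only looks at consecutive pairs, so a ≤-sorted list and the <-sorted list
-- with the same members produce the same gaps.
lemma pvGapsA_mono_eq : ∀ (n : Nat) (M N : List Int), M.length ≤ n →
    M.Pairwise (· ≤ ·) → N.Pairwise (· < ·) → (∀ x, x ∈ M ↔ x ∈ N) →
    pvGapsA M = pvGapsA N := by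
  intro n
  induction n with
  | zero =>
    intro M N hlen _ _ hmem
    have hM : M = [] := List.length_eq_zero_iff.mp (Nat.le_zero.mp hlen)
    subst hM
    have hN : N = [] := by
      cases N with
      | nil => rfl
      | cons b t => exact absurd ((hmem b).mpr (List.mem_cons_self)) (List.not_mem_nil)
    subst hN; rfl
  | succ n ih =>
    intro M N hlen hM hN hmem
    cases M with
    | nil =>
      have hN0 : N = [] := by
        cases N with
        | nil => rfl
        | cons b t => exact absurd ((hmem b).mpr (List.mem_cons_self)) (List.not_mem_nil)
      subst hN0; rfl
    | cons a M' =>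
      -- N is nonempty with head a
      obtain ⟨b, N', rfl⟩ : ∃ b N', N = b :: N' := by
        cases N with
        | nil => exact absurd ((hmem a).mp (List.mem_cons_self)) (List.not_mem_nil)
        | cons b t => exact ⟨b, t, rfl⟩
      have hab : a = b := by
        have h1 : a ≤ b := by
          have hbM : b ∈ a :: M' := (hmem b).mpr (List.mem_cons_self)
          rcases List.mem_cons.mp hbM with h | h
          · omega
          · exact (List.pairwise_cons.mp hM).1 b h
        have h2 : b ≤ a := by
          have haN : a ∈ b :: N' := (hmem a).mp (List.mem_cons_self)
          rcases List.mem_cons.mp haN with h | h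
          · omega
          · exact le_of_lt ((List.pairwise_cons.mp hN).1 a h)
        omega
      subst hab
      cases M' with
      | nil =>
        have hN' : N' = [] := by
          cases N' with
          | nil => rfl
          | cons c t =>
            have hc : c ∈ [a] := (hmem c).mpr (List.mem_cons_of_mem _ List.mem_cons_self)
            have : c = a := by simpa using hc
            have := (List.pairwise_cons.mp hN).1 c (List.mem_cons_self)
            omega
        subst hN'; rfl
      | cons c M'' =>
        by_cases hca : c = a
        · -- duplicate head: drop it on the M side
          subst hca
          have hstep : pvGapsA (c :: c :: M'') = pvGapsA (c :: M'') := by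
            simp [pvGapsA]
          rw [hstep]
          apply ih (c :: M'') (c :: N')
          · simpa using hlen
          · have h1 := List.pairwise_cons.mp hM
            have h2 := List.pairwise_cons.mp h1.2
            exact List.pairwise_cons.mpr ⟨h2.1, h2.2⟩
          · exact hN
          · intro x
            have h := hmem x
            simp only [List.mem_cons] at h ⊢
            tauto
        · -- distinct second element: tails have the same members
          have hac : a < c := by
            have := (List.pairwise_cons.mp hM).1 c (List.mem_cons_self)
            omega
          have hmem' : ∀ x, x ∈ c :: M'' ↔ x ∈ N' := by
            intro x
            constructor
            · intro hx
              have hxa : a < x := by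
                rcases List.mem_cons.mp hx with h | h
                · omega
                · have h1 := List.pairwise_cons.mp hM
                  have h2 := List.pairwise_cons.mp h1.2
                  have := h2.1 x h
                  omega
              have hxN : x ∈ a :: N' := (hmem x).mp (List.mem_cons_of_mem _ hx)
              rcases List.mem_cons.mp hxN with h | h
              · omega
              · exact h
            · intro hx
              have hxa : a < x := (List.pairwise_cons.mp hN).1 x hx
              have hxM : x ∈ a :: c :: M'' := (hmem x).mpr (List.mem_cons_of_mem _ hx)
              rcases List.mem_cons.mp hxM with h | h
              · omega
              · exact h
          -- N' is nonempty with head c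
          obtain ⟨d, N'', rfl⟩ : ∃ d N'', N' = d :: N'' := by
            cases N' with
            | nil => exact absurd ((hmem' c).mp (List.mem_cons_self)) (List.not_mem_nil)
            | cons d t => exact ⟨d, t, rfl⟩
          have hdc : d = c := by
            have h1 : c ≤ d := by
              have hdM : d ∈ c :: M'' := (hmem' d).mpr (List.mem_cons_self)
              rcases List.mem_cons.mp hdM with h | h
              · omega
              · have h1 := List.pairwise_cons.mp hM
                have h2 := List.pairwise_cons.mp h1.2
                exact h2.1 d h
            have h2 : d ≤ c := by
              have hcN : c ∈ d :: N'' := (hmem' c).mp (List.mem_cons_self)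
              rcases List.mem_cons.mp hcN with h | h
              · omega
              · exact le_of_lt ((List.pairwise_cons.mp (List.pairwise_cons.mp hN).2).1 c h)
            omega
          rw [hdc] at hmem' hN ⊢
          have hrec : pvGapsA (c :: M'') = pvGapsA (c :: N'') := by
            apply ih
            · simpa using hlen
            · exact (List.pairwise_cons.mp hM).2
            · exact (List.pairwise_cons.mp hN).2
            · exact hmem'
          simp [pvGapsA, hrec]

-- pvChase from cur, with D the <-sorted list of set members above cur, computes pvGaps (cur :: D).
lemma pvChase_eq : ∀ (fuel : Nat) (S : List Int) (hi cur : Int) (D : List Int),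
    S.Nodup → cur ∈ S → hi ∈ S → (∀ y ∈ S, y ≤ hi) →
    D.Pairwise (· < ·) → (∀ x, x ∈ D ↔ x ∈ S ∧ cur < x) → D.length ≤ fuel →
    pvChase S hi cur fuel = pvGapsA (cur :: D) := by
  intro fuel
  induction fuel with
  | zero =>
    intro S hi cur D _ _ _ _ _ _ hlen
    have hD : D = [] := List.length_eq_zero_iff.mp (Nat.le_zero.mp hlen)
    subst hD; rfl
  | succ f ih =>
    intro S hi cur D hnd hcur hhiS hhi hD hDm hlen
    by_cases hlt : cur < hi
    · -- hi ∈ D, so D is nonempty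
      obtain ⟨d, D', rfl⟩ : ∃ d D', D = d :: D' := by
        cases D with
        | nil => exact absurd ((hDm hi).mpr ⟨hhiS, hlt⟩) (List.not_mem_nil)
        | cons d t => exact ⟨d, t, rfl⟩
      have hdS : d ∈ S ∧ cur < d := (hDm d).mp List.mem_cons_self
      -- the filtered list and its minimum
      have hdF : d ∈ S.filter (fun y => decide (cur < y)) := by
        simp [List.mem_filter, hdS.1, hdS.2]
      have hFne : S.filter (fun y => decide (cur < y)) ≠ [] := by
        intro h; rw [h] at hdF; exact List.not_mem_nil hdF
      obtain ⟨nxt, hmin⟩ : ∃ nxt, PySem.List.min? (S.filter (fun y => decide (cur < y))) (fun y => y) = some nxt := by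
        cases hm : PySem.List.min? (S.filter (fun y => decide (cur < y))) (fun y => y) with
        | none => exact absurd (((PySem.List.min?_eq_none_iff _ _).mp hm)) hFne
        | some v => exact ⟨v, rfl⟩
      have hnxtF := PySem.List.min?_mem hmin
      have hnxtS : nxt ∈ S ∧ cur < nxt := by
        have := List.mem_filter.mp hnxtF
        exact ⟨this.1, by simpa using this.2⟩
      have hmin' := PySem.List.min?_isMin hmin
      have hnd' : nxt = d := by
        have h1 : nxt ≤ d := hmin' d hdF
        have h2 : nxt ∈ d :: D' := (hDm nxt).mpr hnxtS
        rcases List.mem_cons.mp h2 with h | h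
        · exact h
        · have := (List.pairwise_cons.mp hD).1 nxt h
          omega
      subst hnd'
      have hstep : pvChase S hi cur (f + 1) =
          (if nxt > cur + 1 then [(PySem.Int.toStr (cur + 1), PySem.Int.toStr (nxt - 1))] else [])
            ++ pvChase S hi nxt f := by
        simp [pvChase, hlt, hmin]
      rw [hstep]
      have hrec : pvChase S hi nxt f = pvGapsA (nxt :: D') := by
        apply ih S hi nxt D' hnd hnxtS.1 hhiS hhi (List.pairwise_cons.mp hD).2
        · intro x
          constructor
          · intro hx
            have hxm := (hDm x).mp (List.mem_cons_of_mem _ hx)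
            exact ⟨hxm.1, (List.pairwise_cons.mp hD).1 x hx⟩
          · intro hx
            have : x ∈ nxt :: D' := (hDm x).mpr ⟨hx.1, lt_trans hnxtS.2 hx.2⟩
            rcases List.mem_cons.mp this with h | h
            · omega
            · exact h
        · simpa using Nat.le_of_succ_le_succ (by simpa using hlen)
      rw [hrec]
      simp only [pvGapsA, gt_iff_lt]
      split_ifs <;> first | rfl | omega
    · -- no element above cur: D = [] and both sides are []
      have hD0 : D = [] := by
        cases D with
        | nil => rfl
        | cons d t =>
          have h := (hDm d).mp List.mem_cons_self
          have := hhi d h.1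
          omega
      subst hD0
      simp [pvChase, hlt, pvGapsA]

-- ===== VERDICT (by name: the statement is the Claim_ definition above) =====
theorem verify_item_sequence_spec : Claim_equal_verify_item_sequence := by
  intro xs g _
  unfold Spec_verify_item_sequence verify_item_sequence verify_item_sequence_alt
  by_cases hg : xs = [] ∨ xs.length < 2
  · simp only [if_pos hg]
  · simp only [if_neg hg]
    set strs := xs.filter (fun n => decide (n ≠ "") && PySem.Str.strIsdigit n) with hstrs
    by_cases hall : (strs.all (fun n => (PySem.Int.ofStr? n).isSome)) = true
    · simp only [hall, if_pos]
      set vals := strs.filterMap PySem.Int.ofStr? with hvals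
      set S : PySem.Set Int := PySem.Set.ofList vals with hS
      cases hm : PySem.List.min? S (fun x => x) with
      | none =>
        have hS0 : S = [] := (PySem.List.min?_eq_none_iff _ _).mp hm
        have hv0 : vals = [] := by
          cases hv : vals with
          | nil => rfl
          | cons a t =>
            have ha : a ∈ S := by
              rw [hS, hv]
              exact (PySem.Set.mem_ofList _ _).mpr List.mem_cons_self
            rw [hS0] at ha
            exact absurd ha List.not_mem_nil
        rw [hv0, hS0]
        rw [(PySem.List.sorted_eq_nil_iff ([] : List Int) (fun x => x) false).mpr rfl]
        rfl
      | some lo =>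
        have hloS : lo ∈ S := PySem.List.min?_mem hm
        obtain ⟨hi, hmax⟩ : ∃ hi, PySem.List.max? S (fun x => x) = some hi := by
          cases hmx : PySem.List.max? S (fun x => x) with
          | none =>
            have h0 : S = [] := (PySem.List.max?_eq_none_iff _ _).mp hmx
            rw [h0] at hloS
            exact absurd hloS List.not_mem_nil
          | some v => exact ⟨v, rfl⟩
        rw [hmax]
        set Dfull := PySem.List.sorted S (fun x => x) false with hDfull
        have hDlt : Dfull.Pairwise (· < ·) := PySem.List.sorted_ofList_pairwise_lt vals
        have hDmem : ∀ x, x ∈ Dfull ↔ x ∈ S := fun x => PySem.List.mem_sorted _ _ _ _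
        obtain ⟨d0, T, hDeq⟩ : ∃ d0 T, Dfull = d0 :: T := by
          cases hD : Dfull with
          | nil =>
            have h0 : S = [] := (PySem.List.sorted_eq_nil_iff _ _ _).mp hD
            rw [h0] at hloS
            exact absurd hloS List.not_mem_nil
          | cons d t => exact ⟨d, t, rfl⟩
        have hd0 : d0 = lo := by
          have h1 : d0 ≤ lo := PySem.List.key_head_sorted_le _ _ hDeq lo hloS
          have hd0S : d0 ∈ S := (hDmem d0).mp (hDeq ▸ List.mem_cons_self)
          have h2 : lo ≤ d0 := PySem.List.min?_isMin hm d0 hd0S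
          omega
        subst hd0
        have hDlt' : (d0 :: T).Pairwise (· < ·) := hDeq ▸ hDlt
        have hDmem' : ∀ x, x ∈ d0 :: T ↔ x ∈ S := fun x => hDeq ▸ hDmem x
        have step1 : pvGapsA (PySem.List.sorted vals (fun x => x) false) = pvGapsA Dfull := by
          apply pvGapsA_mono_eq (PySem.List.sorted vals (fun x => x) false).length _ _ le_rfl
          · exact PySem.List.sorted_pairwise _ _
          · exact hDlt
          · intro x
            rw [PySem.List.mem_sorted, hDmem, hS, PySem.Set.mem_ofList]
        have step3 : pvChase S hi d0 S.length = pvGapsA (d0 :: T) := by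
          apply pvChase_eq S.length S hi d0 T
          · rw [hS]; exact PySem.Set.nodup_ofList vals
          · exact hloS
          · exact PySem.List.max?_mem hmax
          · exact fun y hy => PySem.List.max?_isMax hmax y hy
          · exact (List.pairwise_cons.mp hDlt').2
          · intro x
            constructor
            · intro hx
              exact ⟨(hDmem' x).mp (List.mem_cons_of_mem _ hx),
                     (List.pairwise_cons.mp hDlt').1 x hx⟩
            · intro hx
              rcases List.mem_cons.mp ((hDmem' x).mpr hx.1) with h | h
              · omega
              · exact h
          · have hp : Dfull.length = S.length := (PySem.List.sorted_perm _ _ _).length_eq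
            rw [hDeq] at hp
            simp at hp
            omega
        rw [step1, hDeq]
        exact step3.symm
    · simp [hall]
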